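-- pv_equiv track=rewrite | github.com/mcbaguetti/leetpy | easy/segments.py | num_segments
-- ===== SOURCE A (Python) =====
-- def num_segments(string):
--
--     space = " "
--     count = 0
--     first_word = False
--     str_length = string.__len__()
--
--     if string is None or string == space:
--         return 0
--
--     for i, character in enumerate(string):
--
--         if string[i] == space:
--             continue
--
--         elif first_word:
--             count += 1
--             first_word = True
--
--         elif i != str_length - 1 and string[i+1] == space or i == str_length - 1:
--             count += 1
--
--     return count
-- ===== SOURCE B (Python) =====
-- def num_segments(string):
--     parts = string.split(" ")
--     return len([w for w in parts if w])
-- ===== Notes on version B (the rewrite author's own statement) =====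
-- stated objective: idiomatic
-- what changed: Replaced the manual indexed character scan with word-boundary lookahead by split-on-literal-space followed by counting the non-empty tokens.
import Mathlib
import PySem

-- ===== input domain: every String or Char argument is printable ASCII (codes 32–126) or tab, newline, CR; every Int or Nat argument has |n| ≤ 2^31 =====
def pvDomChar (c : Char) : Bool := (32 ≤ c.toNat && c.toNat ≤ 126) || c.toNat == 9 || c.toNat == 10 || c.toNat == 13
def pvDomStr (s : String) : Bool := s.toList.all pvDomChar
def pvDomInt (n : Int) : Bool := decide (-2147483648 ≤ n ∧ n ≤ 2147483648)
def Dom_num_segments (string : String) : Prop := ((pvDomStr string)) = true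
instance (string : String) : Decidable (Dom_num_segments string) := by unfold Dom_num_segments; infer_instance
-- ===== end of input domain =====

-- B replaces A's indexed word-boundary scan by split-on-" " + count of non-empty tokens (idiomatic; a timing run measured it faster by a constant factor).


-- ===== PORT A =====
-- string[i] is only evaluated with i in range (the i+1 read matters only when i ≠ str_length-1),
-- so Python's string[·] is ported as pyGetD; the default is never the returned value's source.
def num_segments (string : String) : Int :=
  let space : String := " "
  let count : Int := 0
  let first_word : Bool := false
  let str_length : Int := PySem.Str.len string
  if string == space then 0
  else
    let cs := string.toList
    let r := (PySem.List.enumerate cs 0).foldl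
      (fun (st : Int × Bool) (p : Int × Char) =>
        if PySem.List.pyGetD cs p.1 ' ' == ' ' then st
        else if st.2 then (st.1 + 1, true)
        else if (p.1 != str_length - 1 && (PySem.List.pyGetD cs (p.1 + 1) ' ' == ' ')) || p.1 == str_length - 1 then
          (st.1 + 1, st.2)
        else st) (count, first_word)
    r.1

-- ===== PORT B =====
-- Source B: parts = string.split(" "); return len([w for w in parts if w]).
-- split(" ") with a non-empty literal separator is PySem.Chars.splitOn; a token is truthy iff non-empty.
def num_segments_alt (string : String) : Int :=
  let parts := PySem.Chars.splitOn string.toList [' ']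
  ((parts.filter (fun w => !w.isEmpty)).length : Int)

-- ===== PRECONDITION & SPEC =====
def Spec_num_segments (string : String) (out : Int) : Prop := out = num_segments_alt string
instance (string : String) (out : Int) : Decidable (Spec_num_segments string out) := by unfold Spec_num_segments; infer_instance

-- ===== CLAIM (what is proved, stated in full; the proofs are below) =====
def Claim_equal_num_segments : Prop := ∀ (string : String), Dom_num_segments string → Spec_num_segments string (num_segments string)

-- ===== LEMMAS AND PROOFS =====

-- the Boolean A's loop tests at index i (with first_word permanently false)
def segCond (cs : List Char) (n : Int) (p : Int × Char) : Bool :=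
  !(PySem.List.pyGetD cs p.1 ' ' == ' ') &&
    ((p.1 != n - 1 && (PySem.List.pyGetD cs (p.1 + 1) ' ' == ' ')) || p.1 == n - 1)

-- number of word ends: positions holding a non-space followed by a space or the end
def wordEnds : List Char → Nat
  | [] => 0
  | [c] => if c ≠ ' ' then 1 else 0
  | c :: r :: rs => (if c ≠ ' ' ∧ r = ' ' then 1 else 0) + wordEnds (r :: rs)

-- segment count of the remaining input given whether a word is currently open
def segsAux : List Char → Bool → Nat
  | [], inw => if inw then 1 else 0
  | c :: rest, inw => if c = ' ' then (if inw then 1 else 0) + segsAux rest false else segsAux rest true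

-- 1 iff a still-open word would end right here (at the start of l or at its very end)
def bump : List Char → Nat
  | [] => 1
  | c :: _ => if c = ' ' then 1 else 0

lemma wordEnds_space (rest : List Char) : wordEnds (' ' :: rest) = wordEnds rest := by
  cases rest <;> simp [wordEnds]

lemma wordEnds_nonspace (c : Char) (rest : List Char) (hc : c ≠ ' ') :
    wordEnds (c :: rest) = bump rest + wordEnds rest := by
  cases rest with
  | nil => simp [wordEnds, bump, hc]
  | cons r rs => by_cases hr : r = ' ' <;> simp [wordEnds, bump, hc, hr]

lemma foldA_count (cs : List Char) (n : Int) (l : List (Int × Char)) (acc : Int) :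
    l.foldl (fun (st : Int × Bool) (p : Int × Char) =>
        if PySem.List.pyGetD cs p.1 ' ' == ' ' then st
        else if st.2 then (st.1 + 1, true)
        else if (p.1 != n - 1 && (PySem.List.pyGetD cs (p.1 + 1) ' ' == ' ')) || p.1 == n - 1 then
          (st.1 + 1, st.2)
        else st) (acc, false)
    = (acc + (l.countP (segCond cs n) : Int), false) := by
  induction l generalizing acc with
  | nil => simp
  | cons p l ih =>
    set f := (fun (st : Int × Bool) (q : Int × Char) =>
        if PySem.List.pyGetD cs q.1 ' ' == ' ' then st
        else if st.2 then (st.1 + 1, true)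
        else if (q.1 != n - 1 && (PySem.List.pyGetD cs (q.1 + 1) ' ' == ' ')) || q.1 == n - 1 then
          (st.1 + 1, st.2)
        else st) with hf
    have hstep : f (acc, false) p
        = (acc + (if segCond cs n p then (1 : Int) else 0), false) := by
      rw [hf]
      by_cases h1 : PySem.List.pyGetD cs p.1 ' ' == ' '
      · simp [segCond, h1]
      · by_cases h2 : (p.1 != n - 1 && (PySem.List.pyGetD cs (p.1 + 1) ' ' == ' ')) || p.1 == n - 1
        · simp [segCond, h1, h2]
        · simp [segCond, h1, h2]
    rw [List.foldl_cons, hstep, ih, List.countP_cons]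
    by_cases hp : segCond cs n p <;> simp [hp] <;> omega

lemma segsAux_eq (l : List Char) :
    segsAux l false = wordEnds l ∧ segsAux l true = wordEnds l + bump l := by
  induction l with
  | nil => simp [segsAux, wordEnds, bump]
  | cons c rest ih =>
    by_cases hc : c = ' '
    · subst hc
      refine ⟨?_, ?_⟩
      · rw [wordEnds_space]
        simpa [segsAux] using ih.1
      · rw [wordEnds_space]
        simp [segsAux, bump, ih.1, Nat.add_comm]
    · refine ⟨?_, ?_⟩
      · rw [wordEnds_nonspace c rest hc]
        simp [segsAux, hc, ih.2, Nat.add_comm]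
      · rw [wordEnds_nonspace c rest hc]
        simp [segsAux, hc, ih.2, bump, Nat.add_comm]

lemma go_count (l : List Char) (fuel : Nat) (cur : List Char) (acc : List (List Char))
    (h : l.length < fuel) :
    ((PySem.Chars.splitOn.go [' '] fuel l cur acc).filter (fun w => !w.isEmpty)).length
      = (acc.filter (fun w => !w.isEmpty)).length + segsAux l (!cur.isEmpty) := by
  induction l generalizing fuel cur acc with
  | nil =>
    match fuel, h with
    | fuel + 1, _ =>
      simp [PySem.Chars.splitOn.go, segsAux, List.filter_reverse, List.filter_cons]
      cases cur <;> simp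
  | cons c rest ih =>
    match fuel, h with
    | fuel + 1, h =>
      by_cases hc : c = ' '
      · subst hc
        have hpre : ([' '].isPrefixOf (' ' :: rest)) = true := by simp [List.isPrefixOf]
        rw [PySem.Chars.splitOn.go]
        simp only [hpre, if_pos, List.length_cons, List.length_nil, List.drop_succ_cons,
          List.drop_zero]
        rw [ih fuel [] _ (by simpa using Nat.lt_of_succ_lt_succ h)]
        simp [segsAux, List.filter_cons]
        cases cur <;> simp <;> omega
      · have hpre : ([' '].isPrefixOf (c :: rest)) = false := by
          simp [List.isPrefixOf]; exact fun hc' => absurd hc'.symm hc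
        rw [PySem.Chars.splitOn.go]
        simp only [hpre, Bool.false_eq_true, if_neg, not_false_iff]
        rw [ih fuel (c :: cur) acc (by simpa using Nat.lt_of_succ_lt_succ h)]
        simp [segsAux, hc]

lemma enumCount (rest pre : List Char) :
    ((PySem.List.enumerate rest (pre.length : Int)).countP
        (segCond (pre ++ rest) ((pre ++ rest).length : Int))) = wordEnds rest := by
  induction rest generalizing pre with
  | nil => simp [PySem.List.enumerate_nil, wordEnds]
  | cons c rest ih =>
    rw [PySem.List.enumerate_cons, List.countP_cons]
    have hget : PySem.List.pyGetD (pre ++ c :: rest) (pre.length : Int) ' ' = c := by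
      rw [PySem.List.pyGetD_of_nonneg _ _ (by positivity)]
      simp [List.getD_eq_getElem?_getD]
    cases rest with
    | nil =>
      have hn1 : ((pre ++ [c]).length : Int) - 1 = (pre.length : Int) := by simp
      simp only [PySem.List.enumerate_nil, List.countP_nil, segCond, hget, hn1]
      by_cases hc : c = ' ' <;> simp [wordEnds, hc]
    | cons r rs =>
      have htail : (PySem.List.enumerate (r :: rs) ((pre.length : Int) + 1)).countP
          (segCond (pre ++ c :: r :: rs) ((pre ++ c :: r :: rs).length : Int))
          = wordEnds (r :: rs) := by
        have h1 : ((pre ++ [c]).length : Int) = (pre.length : Int) + 1 := by simp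
        have h2 : (pre ++ [c]) ++ r :: rs = pre ++ c :: r :: rs := by simp
        rw [← h1, ← h2]
        exact ih (pre ++ [c])
      rw [htail]
      have hget2 : PySem.List.pyGetD (pre ++ c :: r :: rs) ((pre.length : Int) + 1) ' ' = r := by
        have h1 : (pre.length : Int) + 1 = ((pre ++ [c]).length : Int) := by simp
        have h2 : pre ++ c :: r :: rs = (pre ++ [c]) ++ r :: rs := by simp
        rw [h1, h2, PySem.List.pyGetD_of_nonneg _ _ (by positivity)]
        simp [List.getD_eq_getElem?_getD]
      have hne : ((pre.length : Int) != ((pre ++ c :: r :: rs).length : Int) - 1) = true := by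
        simp; omega
      have hne2 : ((pre.length : Int) == ((pre ++ c :: r :: rs).length : Int) - 1) = false := by
        simp; omega
      simp only [segCond, hget, hget2, hne, hne2, Bool.true_and, Bool.or_false, wordEnds]
      by_cases hc : c = ' ' <;> by_cases hr : r = ' ' <;> simp [hc, hr] <;> omega

-- ===== VERDICT (by name: the statement is the Claim_ definition above) =====
theorem num_segments_spec : Claim_equal_num_segments := by
  intro s _
  show num_segments s = num_segments_alt s
  by_cases hs : s = " "
  · subst hs; decide
  · unfold num_segments num_segments_alt
    have hbe : (s == " ") = false := by simpa using hs
    simp only [hbe, Bool.false_eq_true, if_neg, not_false_iff]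
    have hA := foldA_count s.toList (PySem.Str.len s) (PySem.List.enumerate s.toList 0) 0
    rw [hA]
    have hn : PySem.Str.len s = ((([] : List Char) ++ s.toList).length : Int) := by
      simp [PySem.Str.len_eq]
    have hcs : s.toList = ([] : List Char) ++ s.toList := by simp
    have hE : (PySem.List.enumerate s.toList 0).countP (segCond s.toList (PySem.Str.len s))
        = wordEnds s.toList := by
      have := enumCount s.toList []
      simpa [hn] using this
    have hB : ((PySem.Chars.splitOn s.toList [' ']).filter (fun w => !w.isEmpty)).length
        = segsAux s.toList false := by
      have := go_count s.toList (s.toList.length + 1) [] [] (by omega)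
      simpa [PySem.Chars.splitOn] using this
    rw [hE]
    simp [hB, (segsAux_eq s.toList).1]
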